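-- pv_equiv track=rewrite | github.com/pypi-data/pypi-mirror-390 | packages/tonina/tonina-0.1.0.tar.gz/tonina-0.1.0/src/tonina/agents/general_agent/general_tools.py | _suggest_agent_for_step
-- ===== SOURCE A (Python) =====
-- def _suggest_agent_for_step(step_description: str) -> str:
--     """Suggest which agent should handle a workflow step."""
--     step_lower = step_description.lower()
--
--     if any(keyword in step_lower for keyword in ['gff', 'gtf', 'gene', 'annotation']):
--         return "gff"
--     elif any(keyword in step_lower for keyword in ['fasta', 'sequence', 'dna', 'rna']):
--         return "sequence"
--     elif any(keyword in step_lower for keyword in ['protein', 'structure', 'pdb']):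
--         return "proteomics"
--     elif any(keyword in step_lower for keyword in ['tree', 'phylogen', 'evolution']):
--         return "phylogenetics"
--     else:
--         return "general"
-- ===== SOURCE B (Python) =====
-- _AGENTS = ("gff", "sequence", "proteomics", "phylogenetics")
--
-- # flat (keyword, priority) table; priority = index of the agent group
-- _KEYWORDS = [
--     ("gff", 0), ("gtf", 0), ("gene", 0), ("annotation", 0),
--     ("fasta", 1), ("sequence", 1), ("dna", 1), ("rna", 1),
--     ("protein", 2), ("structure", 2), ("pdb", 2),
--     ("tree", 3), ("phylogen", 3), ("evolution", 3),
-- ]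
--
--
-- def _suggest_agent_for_step(step_description: str) -> str:
--     """Suggest which agent should handle a workflow step."""
--     s = step_description.lower()
--     best = 4
--     for start in range(len(s)):
--         for kw, pri in _KEYWORDS:
--             if pri < best and s.startswith(kw, start):
--                 best = pri
--         if best == 0:
--             break
--     return _AGENTS[best] if best < 4 else "general"
-- ===== Notes on version B (the rewrite author's own statement) =====
-- stated objective: alternative
-- what changed: Replaced the four per-group substring searches ('kw in s' per keyword) by a single left-to-right scan over the lowered string that, at each position, checks a flat (keyword, priority) table for a prefix match and keeps the minimal priority, breaking early when priority 0 is reached.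
import Mathlib
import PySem

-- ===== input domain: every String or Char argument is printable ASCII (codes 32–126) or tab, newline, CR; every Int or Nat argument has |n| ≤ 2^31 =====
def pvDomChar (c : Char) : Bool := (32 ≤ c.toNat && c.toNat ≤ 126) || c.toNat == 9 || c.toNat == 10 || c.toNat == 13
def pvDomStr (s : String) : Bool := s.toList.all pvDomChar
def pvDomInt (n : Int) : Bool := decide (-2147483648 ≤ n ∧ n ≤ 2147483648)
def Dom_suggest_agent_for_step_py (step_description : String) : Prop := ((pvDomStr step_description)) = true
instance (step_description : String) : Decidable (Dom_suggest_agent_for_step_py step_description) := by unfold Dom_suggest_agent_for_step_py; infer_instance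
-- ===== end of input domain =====

-- B replaces the four per-group 'kw in s' searches by one left-to-right scan over the
-- lowered string keeping the minimal-priority keyword matching at each position (alternative, not faster).

-- ===== PORT A =====
def suggest_agent_for_step_py (step_description : String) : String :=
  let step_lower := PySem.Str.lower step_description
  if (["gff", "gtf", "gene", "annotation"] : List String).any
      (fun kw => PySem.Str.isIn kw step_lower) then "gff"
  else if (["fasta", "sequence", "dna", "rna"] : List String).any
      (fun kw => PySem.Str.isIn kw step_lower) then "sequence"
  else if (["protein", "structure", "pdb"] : List String).any
      (fun kw => PySem.Str.isIn kw step_lower) then "proteomics"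
  else if (["tree", "phylogen", "evolution"] : List String).any
      (fun kw => PySem.Str.isIn kw step_lower) then "phylogenetics"
  else "general"

-- ===== PORT B =====
def pvAgents : List String := ["gff", "sequence", "proteomics", "phylogenetics"]

def pvKeywords : List (List Char × Nat) :=
  [("gff".toList, 0), ("gtf".toList, 0), ("gene".toList, 0), ("annotation".toList, 0),
   ("fasta".toList, 1), ("sequence".toList, 1), ("dna".toList, 1), ("rna".toList, 1),
   ("protein".toList, 2), ("structure".toList, 2), ("pdb".toList, 2),
   ("tree".toList, 3), ("phylogen".toList, 3), ("evolution".toList, 3)]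

-- inner 'for kw, pri in _KEYWORDS' loop at one start position (suffix = s[start:])
def pvBestAt (suffix : List Char) (best : Nat) : Nat :=
  pvKeywords.foldl (fun b p => if p.2 < b ∧ p.1.isPrefixOf suffix then p.2 else b) best

-- outer 'for start in range(len(s))' loop with the 'if best == 0: break' early exit
def pvScan : List Char → Nat → Nat
  | [], best => best
  | c :: rest, best =>
      let best' := pvBestAt (c :: rest) best
      if best' = 0 then 0 else pvScan rest best'

def suggest_agent_for_step_py_alt (step_description : String) : String :=
  let s := (PySem.Str.lower step_description).toList
  let best := pvScan s 4
  if best < 4 then pvAgents.getD best "general" else "general"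

-- ===== PRECONDITION & SPEC =====
def Spec_suggest_agent_for_step_py (step_description : String) (out : String) : Prop := out = suggest_agent_for_step_py_alt step_description
instance (step_description : String) (out : String) : Decidable (Spec_suggest_agent_for_step_py step_description out) := by unfold Spec_suggest_agent_for_step_py; infer_instance

-- ===== CLAIM (what is proved, stated in full; the proofs are below) =====
def Claim_equal_suggest_agent_for_step_py : Prop := ∀ (step_description : String), Dom_suggest_agent_for_step_py step_description → Spec_suggest_agent_for_step_py step_description (suggest_agent_for_step_py step_description)

-- ===== LEMMAS AND PROOFS =====

-- the inner fold distributes over min in its accumulator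
theorem pvFold_min (suf : List Char) (ks : List (List Char × Nat)) :
    ∀ (b₁ b₂ : Nat),
      ks.foldl (fun b p => if p.2 < b ∧ p.1.isPrefixOf suf then p.2 else b) (min b₁ b₂)
        = min b₁ (ks.foldl (fun b p => if p.2 < b ∧ p.1.isPrefixOf suf then p.2 else b) b₂) := by
  induction ks with
  | nil => intro b₁ b₂; simp
  | cons p ks ih =>
      intro b₁ b₂
      simp only [List.foldl_cons]
      have h : (if p.2 < min b₁ b₂ ∧ p.1.isPrefixOf suf then p.2 else min b₁ b₂)
          = min b₁ (if p.2 < b₂ ∧ p.1.isPrefixOf suf then p.2 else b₂) := by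
        by_cases hm : p.1.isPrefixOf suf = true
        · simp only [hm, and_true]; split_ifs <;> omega
        · simp [hm]
      rw [h, ih]

theorem pvFold_le_iff (suf : List Char) (ks : List (List Char × Nat)) :
    ∀ (b i : Nat),
      (ks.foldl (fun b p => if p.2 < b ∧ p.1.isPrefixOf suf then p.2 else b) b ≤ i
        ↔ b ≤ i ∨ ∃ p ∈ ks, p.2 ≤ i ∧ p.1.isPrefixOf suf = true) := by
  induction ks with
  | nil => intro b i; simp
  | cons p ks ih =>
      intro b i
      simp only [List.foldl_cons, List.mem_cons]
      rw [ih]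
      have hstep : ((if p.2 < b ∧ p.1.isPrefixOf suf then p.2 else b) ≤ i)
          ↔ b ≤ i ∨ (p.2 ≤ i ∧ p.1.isPrefixOf suf = true) := by
        by_cases hm : p.1.isPrefixOf suf = true
        · simp only [hm, and_true]; split_ifs <;> omega
        · simp [hm]
      rw [hstep]
      constructor
      · rintro ((h | ⟨h1, h2⟩) | ⟨q, hq, h1, h2⟩)
        · exact Or.inl h
        · exact Or.inr ⟨p, Or.inl rfl, h1, h2⟩
        · exact Or.inr ⟨q, Or.inr hq, h1, h2⟩
      · rintro (h | ⟨q, (rfl | hq), h1, h2⟩)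
        · exact Or.inl (Or.inl h)
        · exact Or.inl (Or.inr ⟨h1, h2⟩)
        · exact Or.inr ⟨q, hq, h1, h2⟩

theorem pvScan_le_iff : ∀ (cs : List Char) (b i : Nat), b ≤ 4 → i < 4 →
    (pvScan cs b ≤ i ↔ b ≤ i ∨ ∃ p ∈ pvKeywords, p.2 ≤ i ∧ p.1 <:+: cs) := by
  intro cs
  induction cs with
  | nil =>
      intro b i hb hi
      simp only [pvScan]
      constructor
      · exact fun h => Or.inl h
      · rintro (h | ⟨q, hq, h1, h2⟩)
        · exact h
        · exfalso
          rcases q with ⟨kw, pri⟩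
          fin_cases hq <;> exact absurd (List.eq_nil_of_infix_nil h2) (by decide)
  | cons c r ih =>
      intro b i hb hi
      have hmin : pvBestAt (c :: r) b = min b (pvBestAt (c :: r) 4) := by
        have h := pvFold_min (c :: r) pvKeywords b 4
        rw [Nat.min_eq_left hb] at h
        exact h
      have hb4 : pvBestAt (c :: r) b ≤ 4 := by
        rw [hmin]; exact le_trans (Nat.min_le_left _ _) hb
      have hbest : pvBestAt (c :: r) 4 ≤ i
          ↔ 4 ≤ i ∨ ∃ p ∈ pvKeywords, p.2 ≤ i ∧ p.1.isPrefixOf (c :: r) = true :=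
        pvFold_le_iff (c :: r) pvKeywords 4 i
      have hsplit : (∃ p ∈ pvKeywords, p.2 ≤ i ∧ p.1 <:+: (c :: r))
          ↔ (∃ p ∈ pvKeywords, p.2 ≤ i ∧ p.1.isPrefixOf (c :: r) = true)
            ∨ (∃ p ∈ pvKeywords, p.2 ≤ i ∧ p.1 <:+: r) := by
        constructor
        · rintro ⟨q, hq, h1, h2⟩
          rcases List.infix_cons_iff.mp h2 with h | h
          · exact Or.inl ⟨q, hq, h1, List.isPrefixOf_iff_prefix.mpr h⟩
          · exact Or.inr ⟨q, hq, h1, h⟩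
        · rintro (⟨q, hq, h1, h2⟩ | ⟨q, hq, h1, h2⟩)
          · exact ⟨q, hq, h1, (List.isPrefixOf_iff_prefix.mp h2).isInfix⟩
          · exact ⟨q, hq, h1, List.infix_cons h2⟩
      show (if pvBestAt (c :: r) b = 0 then 0 else pvScan r (pvBestAt (c :: r) b)) ≤ i ↔ _
      by_cases h0 : pvBestAt (c :: r) b = 0
      · rw [if_pos h0]
        simp only [Nat.zero_le, true_iff]
        rw [hsplit]
        rw [hmin] at h0
        rcases Nat.min_eq_zero_iff.mp h0 with h | h
        · exact Or.inl (h ▸ Nat.zero_le i)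
        · have hA : pvBestAt (c :: r) 4 ≤ i := by rw [h]; exact Nat.zero_le i
          rcases hbest.mp hA with h4 | hex
          · exact absurd h4 (Nat.not_le.mpr hi)
          · exact Or.inr (Or.inl hex)
      · rw [if_neg h0, ih _ i hb4 hi, hsplit]
        have hb' : pvBestAt (c :: r) b ≤ i ↔ b ≤ i ∨ pvBestAt (c :: r) 4 ≤ i := by
          rw [hmin]; exact min_le_iff
        have h4i : ¬ (4 ≤ i) := Nat.not_le.mpr hi
        rw [hb', hbest]
        constructor
        · rintro ((h | h4 | h1) | h2)
          · exact Or.inl h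
          · exact absurd h4 h4i
          · exact Or.inr (Or.inl h1)
          · exact Or.inr (Or.inr h2)
        · rintro (h | h1 | h2)
          · exact Or.inl (Or.inl h)
          · exact Or.inl (Or.inr (Or.inr h1))
          · exact Or.inr h2

-- m ≤ i (i < 4) exactly when some keyword of priority ≤ i occurs in the lowered text
theorem pvScan_le_iff' (cs : List Char) (i : Nat) (hi : i < 4) :
    (pvScan cs 4 ≤ i ↔ ∃ p ∈ pvKeywords, p.2 ≤ i ∧ p.1 <:+: cs) := by
  rw [pvScan_le_iff cs 4 i le_rfl hi, or_iff_right (Nat.not_le.mpr hi)]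

-- ===== VERDICT (by name: the statement is the Claim_ definition above) =====
theorem suggest_agent_for_step_py_spec : Claim_equal_suggest_agent_for_step_py := by
  intro s hDom
  unfold Spec_suggest_agent_for_step_py
  simp only [suggest_agent_for_step_py, suggest_agent_for_step_py_alt]
  set sl := PySem.Str.lower s with hsl
  set m := pvScan sl.toList 4 with hm
  by_cases h0 : ((["gff", "gtf", "gene", "annotation"] : List String).any
      (fun kw => PySem.Str.isIn kw sl)) = true
  · rw [if_pos h0]
    simp only [List.any_cons, List.any_nil, Bool.or_eq_true, Bool.false_eq_true, or_false] at h0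
    have hle : m ≤ 0 := by
      rw [hm]
      rcases h0 with h | h | h | h
      · exact (pvScan_le_iff' _ 0 (by omega)).mpr
          ⟨("gff".toList, 0), by decide, by decide, (PySem.Chars.isIn_iff_infix _ _).mp h⟩
      · exact (pvScan_le_iff' _ 0 (by omega)).mpr
          ⟨("gtf".toList, 0), by decide, by decide, (PySem.Chars.isIn_iff_infix _ _).mp h⟩
      · exact (pvScan_le_iff' _ 0 (by omega)).mpr
          ⟨("gene".toList, 0), by decide, by decide, (PySem.Chars.isIn_iff_infix _ _).mp h⟩
      · exact (pvScan_le_iff' _ 0 (by omega)).mpr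
          ⟨("annotation".toList, 0), by decide, by decide, (PySem.Chars.isIn_iff_infix _ _).mp h⟩
    have hm0 : m = 0 := Nat.le_zero.mp hle
    rw [hm0]; decide
  · rw [if_neg h0]
    simp only [List.any_cons, List.any_nil, Bool.or_eq_true, Bool.false_eq_true, or_false,
      not_or] at h0
    by_cases h1 : ((["fasta", "sequence", "dna", "rna"] : List String).any
        (fun kw => PySem.Str.isIn kw sl)) = true
    · rw [if_pos h1]
      simp only [List.any_cons, List.any_nil, Bool.or_eq_true, Bool.false_eq_true, or_false] at h1
      have hle : m ≤ 1 := by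
        rw [hm]
        rcases h1 with h | h | h | h
        · exact (pvScan_le_iff' _ 1 (by omega)).mpr
            ⟨("fasta".toList, 1), by decide, by decide, (PySem.Chars.isIn_iff_infix _ _).mp h⟩
        · exact (pvScan_le_iff' _ 1 (by omega)).mpr
            ⟨("sequence".toList, 1), by decide, by decide, (PySem.Chars.isIn_iff_infix _ _).mp h⟩
        · exact (pvScan_le_iff' _ 1 (by omega)).mpr
            ⟨("dna".toList, 1), by decide, by decide, (PySem.Chars.isIn_iff_infix _ _).mp h⟩
        · exact (pvScan_le_iff' _ 1 (by omega)).mpr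
            ⟨("rna".toList, 1), by decide, by decide, (PySem.Chars.isIn_iff_infix _ _).mp h⟩
      have hgt : ¬ m ≤ 0 := by
        intro hc
        obtain ⟨p, hp, hpri, hinf⟩ := (pvScan_le_iff' _ 0 (by omega)).mp (hm ▸ hc)
        fin_cases hp <;> simp_all [← PySem.Chars.isIn_iff_infix]
      have hm1 : m = 1 := by omega
      rw [hm1]; decide
    · rw [if_neg h1]
      simp only [List.any_cons, List.any_nil, Bool.or_eq_true, Bool.false_eq_true, or_false,
        not_or] at h1
      by_cases h2 : ((["protein", "structure", "pdb"] : List String).any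
          (fun kw => PySem.Str.isIn kw sl)) = true
      · rw [if_pos h2]
        simp only [List.any_cons, List.any_nil, Bool.or_eq_true, Bool.false_eq_true, or_false] at h2
        have hle : m ≤ 2 := by
          rw [hm]
          rcases h2 with h | h | h
          · exact (pvScan_le_iff' _ 2 (by omega)).mpr
              ⟨("protein".toList, 2), by decide, by decide, (PySem.Chars.isIn_iff_infix _ _).mp h⟩
          · exact (pvScan_le_iff' _ 2 (by omega)).mpr
              ⟨("structure".toList, 2), by decide, by decide, (PySem.Chars.isIn_iff_infix _ _).mp h⟩
          · exact (pvScan_le_iff' _ 2 (by omega)).mpr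
              ⟨("pdb".toList, 2), by decide, by decide, (PySem.Chars.isIn_iff_infix _ _).mp h⟩
        have hgt : ¬ m ≤ 1 := by
          intro hc
          obtain ⟨p, hp, hpri, hinf⟩ := (pvScan_le_iff' _ 1 (by omega)).mp (hm ▸ hc)
          fin_cases hp <;> simp_all [← PySem.Chars.isIn_iff_infix]
        have hm2 : m = 2 := by omega
        rw [hm2]; decide
      · rw [if_neg h2]
        simp only [List.any_cons, List.any_nil, Bool.or_eq_true, Bool.false_eq_true, or_false,
          not_or] at h2
        by_cases h3 : ((["tree", "phylogen", "evolution"] : List String).any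
            (fun kw => PySem.Str.isIn kw sl)) = true
        · rw [if_pos h3]
          simp only [List.any_cons, List.any_nil, Bool.or_eq_true, Bool.false_eq_true,
            or_false] at h3
          have hle : m ≤ 3 := by
            rw [hm]
            rcases h3 with h | h | h
            · exact (pvScan_le_iff' _ 3 (by omega)).mpr
                ⟨("tree".toList, 3), by decide, by decide, (PySem.Chars.isIn_iff_infix _ _).mp h⟩
            · exact (pvScan_le_iff' _ 3 (by omega)).mpr
                ⟨("phylogen".toList, 3), by decide, by decide, (PySem.Chars.isIn_iff_infix _ _).mp h⟩
            · exact (pvScan_le_iff' _ 3 (by omega)).mpr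
                ⟨("evolution".toList, 3), by decide, by decide, (PySem.Chars.isIn_iff_infix _ _).mp h⟩
          have hgt : ¬ m ≤ 2 := by
            intro hc
            obtain ⟨p, hp, hpri, hinf⟩ := (pvScan_le_iff' _ 2 (by omega)).mp (hm ▸ hc)
            fin_cases hp <;> simp_all [← PySem.Chars.isIn_iff_infix]
          have hm3 : m = 3 := by omega
          rw [hm3]; decide
        · rw [if_neg h3]
          simp only [List.any_cons, List.any_nil, Bool.or_eq_true, Bool.false_eq_true, or_false,
            not_or] at h3
          have hgt : ¬ m ≤ 3 := by
            intro hc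
            obtain ⟨p, hp, hpri, hinf⟩ := (pvScan_le_iff' _ 3 (by omega)).mp (hm ▸ hc)
            fin_cases hp <;> simp_all [← PySem.Chars.isIn_iff_infix]
          rw [if_neg (by omega)]
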